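-- pv_equiv track=rewrite | github.com/Torngt/CNasssignment | projects/torrent/app/torrent.py | iter_blocks
-- ===== SOURCE A (Python) =====
-- from typing import BinaryIO, OrderedDict, List, Any, Tuple, Generator
--
-- BLOCK_LENGTH = 16 * 1024
--
-- def iter_blocks(piece_length: int) -> Generator[Tuple[int, int], None, None]:
--     for block_index, block_begin in enumerate(range(0, piece_length, BLOCK_LENGTH)):
--         blocks_length = (block_index + 1) * BLOCK_LENGTH
--
--         if blocks_length > piece_length:
--             block_length = BLOCK_LENGTH - (blocks_length - piece_length)
--         else:
--             block_length = BLOCK_LENGTH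
--
--         yield block_begin, block_length
-- ===== SOURCE B (Python) =====
-- BLOCK_LENGTH = 16 * 1024
--
-- def iter_blocks(piece_length: int):
--     # two-phase: emit all full blocks uniformly, then the short tail once
--     n_full = piece_length // BLOCK_LENGTH
--     for i in range(max(n_full, 0)):
--         yield i * BLOCK_LENGTH, BLOCK_LENGTH
--     rem = piece_length - n_full * BLOCK_LENGTH
--     if piece_length > 0 and rem > 0:
--         yield n_full * BLOCK_LENGTH, rem
-- ===== Notes on version B (the rewrite author's own statement) =====
-- stated objective: alternative
-- what changed: A loops over every block start with a per-iteration branch computing each block's length; B splits the work into two phases: a uniform loop emitting the n_full = piece_length // BLOCK_LENGTH full blocks, followed by a single guarded emission of the short tail block.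
import Mathlib
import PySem

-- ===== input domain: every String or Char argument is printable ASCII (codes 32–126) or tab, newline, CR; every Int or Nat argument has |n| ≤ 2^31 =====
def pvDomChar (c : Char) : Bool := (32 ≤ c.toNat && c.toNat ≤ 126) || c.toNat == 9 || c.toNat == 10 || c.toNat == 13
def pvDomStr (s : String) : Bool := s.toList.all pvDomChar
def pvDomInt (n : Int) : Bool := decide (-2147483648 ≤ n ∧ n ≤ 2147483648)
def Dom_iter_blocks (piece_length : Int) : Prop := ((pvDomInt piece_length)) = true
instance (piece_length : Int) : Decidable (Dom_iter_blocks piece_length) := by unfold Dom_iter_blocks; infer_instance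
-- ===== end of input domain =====

-- B replaces A's per-iteration length branch by a two-phase pass (all full blocks, then one guarded tail block): same cost, different decomposition.


-- ===== PORT A =====
-- for block_index, block_begin in enumerate(range(0, piece_length, BLOCK_LENGTH)): per-iteration branch on blocks_length
def iter_blocks (piece_length : Int) : List (Int × Int) :=
  (PySem.List.enumerate (PySem.List.pyRange 0 piece_length 16384)).map
    (fun p =>
      let blocks_length := (p.1 + 1) * 16384
      let block_length := if blocks_length > piece_length then 16384 - (blocks_length - piece_length) else (16384 : Int)
      (p.2, block_length))

-- ===== PORT B =====
-- n_full full blocks emitted uniformly, then the short tail block once, guarded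
def iter_blocks_alt (piece_length : Int) : List (Int × Int) :=
  let n_full := PySem.Int.floordiv piece_length 16384
  let full := (PySem.List.pyRange 0 (max n_full 0) 1).map (fun i => (i * 16384, (16384 : Int)))
  let rem := piece_length - n_full * 16384
  if piece_length > 0 ∧ rem > 0 then full ++ [(n_full * 16384, rem)] else full

-- ===== PRECONDITION & SPEC =====
def Spec_iter_blocks (piece_length : Int) (out : List (Int × Int)) : Prop := out = iter_blocks_alt piece_length
instance (piece_length : Int) (out : List (Int × Int)) : Decidable (Spec_iter_blocks piece_length out) := by unfold Spec_iter_blocks; infer_instance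

-- ===== CLAIM (what is proved, stated in full; the proofs are below) =====
def Claim_equal_iter_blocks : Prop := ∀ (piece_length : Int), Dom_iter_blocks piece_length → Spec_iter_blocks piece_length (iter_blocks piece_length)

-- ===== LEMMAS AND PROOFS =====

-- enumerate of a map over List.range, closed form
theorem enumerate_map_range {α : Type} (g : Nat → α) (n : Nat) :
    PySem.List.enumerate ((List.range n).map g) 0 = (List.range n).map (fun (k : Nat) => ((k : Int), g k)) := by
  apply List.ext_getElem
  · simp [PySem.List.length_enumerate]
  · intro k h1 h2
    simp [PySem.List.getElem_enumerate]

-- A's output as a map over List.range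
theorem iter_blocks_eq_map (m : Int) :
    iter_blocks m = (List.range (if 0 < m then ((m + 16384 - 1) / 16384).toNat else 0)).map
      (fun (k : Nat) => ((16384 : Int) * k, if ((k : Int) + 1) * 16384 > m then 16384 - (((k : Int) + 1) * 16384 - m) else (16384 : Int))) := by
  unfold iter_blocks
  rw [PySem.List.pyRange_of_pos 0 m (by norm_num)]
  rw [enumerate_map_range, List.map_map]
  simp only [sub_zero]
  apply List.map_congr_left
  intro k _
  simp

-- B's full-block prefix as a map over List.range
theorem alt_full_eq_map (t : Int) :
    (PySem.List.pyRange 0 (max t 0) 1).map (fun i => (i * 16384, (16384 : Int)))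
      = (List.range (max t 0).toNat).map (fun (k : Nat) => ((k : Int) * 16384, (16384 : Int))) := by
  rw [PySem.List.pyRange_one, List.map_map]
  simp only [sub_zero]
  apply List.map_congr_left
  intro k _
  simp

theorem iter_blocks_agree (m : Int) : iter_blocks m = iter_blocks_alt m := by
  rw [iter_blocks_eq_map]
  unfold iter_blocks_alt
  simp only [alt_full_eq_map]
  have hfd : PySem.Int.floordiv m 16384 = m / 16384 := by
    unfold PySem.Int.floordiv
    rw [Int.fdiv_eq_ediv_of_nonneg]; omega
  rw [hfd]
  set q : Int := m / 16384 with hq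
  have hqb : 16384 * q ≤ m ∧ m < 16384 * (q + 1) := by omega
  by_cases hm : 0 < m
  · have hq0 : 0 ≤ q := by omega
    by_cases hr : m - q * 16384 > 0
    · -- short tail block exists: the range has q + 1 entries
      have hn : ((m + 16384 - 1) / 16384).toNat = q.toNat + 1 := by omega
      rw [if_pos hm, hn, if_pos ⟨hm, hr⟩]
      have hmax : (max q 0).toNat = q.toNat := by omega
      rw [hmax, List.range_succ, List.map_append]
      congr 1
      · apply List.map_congr_left
        intro k hk
        have hk' : (k : Int) < q := by
          simp only [List.mem_range] at hk; omega
        rw [if_neg (by nlinarith)]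
        ring_nf
      · simp only [List.map_cons, List.map_nil]
        have hqc : ((q.toNat : Int)) = q := by omega
        rw [hqc, if_pos (by nlinarith)]
        refine congrArg (fun x => [x]) ?_
        refine Prod.ext ?_ ?_ <;> simp <;> ring
    · -- m is a multiple of the block length: no tail block
      have hn : ((m + 16384 - 1) / 16384).toNat = q.toNat := by omega
      rw [if_pos hm, hn, if_neg (by tauto)]
      have hmax : (max q 0).toNat = q.toNat := by omega
      rw [hmax]
      apply List.map_congr_left
      intro k hk
      have hk' : (k : Int) < q := by simp only [List.mem_range] at hk; omega
      rw [if_neg (by nlinarith)]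
      ring_nf
  · -- m ≤ 0: both sides empty
    have hq0 : q ≤ 0 := by omega
    rw [if_neg hm, if_neg (by omega)]
    have hmax : (max q 0).toNat = 0 := by omega
    rw [hmax]
    simp

-- ===== VERDICT (by name: the statement is the Claim_ definition above) =====
theorem iter_blocks_spec : Claim_equal_iter_blocks := by
  intro m _
  exact iter_blocks_agree m
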